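-- pv_equiv track=rewrite | github.com/yeong-hwan/algorithm-study | junha/programmers/new-id-recommendation.py | solution
-- ===== SOURCE A (Python) =====
-- def solution(new_id):
--     #1
--     answer = new_id.lower()
--
--     #2
--     answer = ''.join(filter(lambda x: x.islower() or x.isdigit() or x in ['.', '-', '_'], answer))
--
--     #3
--     if len(answer) > 0:
--         tmp = answer[0]
--         for idx in range(1, len(answer)):
--             if answer[idx] == '.':
--                 if answer[idx-1] != '.':
--                     tmp += answer[idx]
--             else:
--                     tmp += answer[idx]
--         answer = tmp
--
--     #4
--     while len(answer) > 0 and answer[0] == '.':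
--         answer = answer[1:]
--     while len(answer) > 0 and answer[-1] == '.':
--         answer = answer[:-1]
--
--     #5, 6
--     if len(answer) == 0:
--         answer = 'a'
--     elif len(answer) >= 16:
--         answer = answer[:15]
--         while len(answer) > 0 and answer[0] == '.':
--             answer = answer[1:]
--         while len(answer) > 0 and answer[-1] == '.':
--             answer = answer[:-1]
--     else:
--         pass
--
--     #7
--     while len(answer) < 3:
--         answer += answer[-1]
--
--     return answer
-- ===== SOURCE B (Python) =====
-- def solution(new_id):
--     # single pass: lowercase, filter, collapse duplicate dots and drop leading dots all at once
--     out = []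
--     prev = ''
--     for c in new_id:
--         if 'A' <= c <= 'Z':
--             c = chr(ord(c) + 32)
--         if '0' <= c <= '9' or 'a' <= c <= 'z' or c == '-' or c == '_':
--             out.append(c)
--             prev = c
--         elif c == '.' and prev and prev != '.':
--             out.append(c)
--             prev = c
--     s = ''.join(out).strip('.')
--     s = s[:15].strip('.')
--     if not s:
--         s = 'a'
--     return s + s[-1] * (3 - len(s))
-- ===== Notes on version B (the rewrite author's own statement) =====
-- stated objective: alternative
-- what changed: A's five sequential cleanup passes (lowercase, filter, consecutive-dot-collapse loop, leading/trailing dot-strip while-loops) are fused into one forward pass that lowercases, filters, collapses duplicate dots and drops leading dots at once, followed by strip/truncate/strip and arithmetic padding instead of the while-append loop.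
import Mathlib
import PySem

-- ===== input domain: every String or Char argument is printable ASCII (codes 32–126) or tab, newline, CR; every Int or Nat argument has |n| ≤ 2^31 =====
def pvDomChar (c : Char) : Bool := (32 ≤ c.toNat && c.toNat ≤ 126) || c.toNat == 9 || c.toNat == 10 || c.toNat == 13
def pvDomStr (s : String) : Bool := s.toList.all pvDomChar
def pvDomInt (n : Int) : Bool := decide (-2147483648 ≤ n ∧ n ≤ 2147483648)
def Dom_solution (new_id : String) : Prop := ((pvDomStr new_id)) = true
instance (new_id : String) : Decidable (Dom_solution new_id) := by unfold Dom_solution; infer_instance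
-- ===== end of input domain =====

-- B replaces A's five sequential cleanup passes (filter, dot-collapse loop, two strip
-- while-loops) by a single forward pass that lowercases, filters, collapses duplicate
-- dots and drops leading dots at once, then strips/truncates/pads arithmetically.

-- ===== PORT A =====
-- A's step-2 filter predicate
def pvFilterP (c : Char) : Bool :=
  PySem.Chars.islower c || PySem.Chars.isdigit c || (c == '.' || c == '-' || c == '_')

-- A's step-3 loop: walk with the previous ORIGINAL character, skip '.' after '.'
def pvCollapse : Char → List Char → List Char
  | _, [] => []
  | prev, c :: rest => if c = '.' ∧ prev = '.' then pvCollapse c rest else c :: pvCollapse c rest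

def pvCA : List Char → List Char
  | [] => []
  | h :: t => h :: pvCollapse h t

-- A's 'while answer[0] == '.': answer = answer[1:]'
def pvStripLead : List Char → List Char
  | [] => []
  | c :: rest => if c = '.' then pvStripLead rest else c :: rest

-- A's 'while answer[-1] == '.': answer = answer[:-1]'
def pvStripTrail (l : List Char) : List Char :=
  if h : l.getLast? = some '.' then pvStripTrail l.dropLast else l
termination_by l.length
decreasing_by
  cases l with
  | nil => simp at h
  | cons a t => simp

-- A's step-7 'while len(answer) < 3: answer += answer[-1]' (the ≠ [] guard only makes it total)
def pvPad (l : List Char) : List Char :=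
  if h : l.length < 3 ∧ l ≠ [] then pvPad (l ++ [l.getLast h.2]) else l
termination_by 3 - l.length
decreasing_by simp; omega

def solution (new_id : String) : String :=
  let ans1 := (PySem.Str.lower new_id).toList
  let ans2 := ans1.filter pvFilterP
  let ans3 := pvCA ans2
  let ans4 := pvStripTrail (pvStripLead ans3)
  let ans5 :=
    if ans4.length = 0 then ['a']
    else if 16 ≤ ans4.length then
      pvStripTrail (pvStripLead (PySem.List.slice ans4 none (some 15)))
    else ans4
  String.mk (pvPad ans5)

-- ===== PORT B =====
-- Source B: "if 'A' <= c <= 'Z': c = chr(ord(c) + 32)"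
def pvLow (c : Char) : Char :=
  if 'A' ≤ c ∧ c ≤ 'Z' then Char.ofNat (c.toNat + 32) else c

-- Source B: "'0' <= c <= '9' or 'a' <= c <= 'z' or c == '-' or c == '_'"
def pvKeep (c : Char) : Bool :=
  ('0' ≤ c && c ≤ '9') || ('a' ≤ c && c ≤ 'z') || c == '-' || c == '_'

-- Source B's single for-loop; prev = '' is the `none` state
def pvGo : Option Char → List Char → List Char
  | _, [] => []
  | prev, c :: rest =>
    if pvKeep (pvLow c) then pvLow c :: pvGo (some (pvLow c)) rest
    else if pvLow c = '.' ∧ prev ≠ none ∧ prev ≠ some '.' then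
      pvLow c :: pvGo (some (pvLow c)) rest
    else pvGo prev rest

def solution_alt (new_id : String) : String :=
  let s1 := PySem.Chars.stripChars (pvGo none new_id.toList) ['.']
  let s2 := PySem.Chars.stripChars (PySem.List.slice s1 none (some 15)) ['.']
  let s3 := if s2 = [] then ['a'] else s2
  String.mk (s3 ++ List.replicate (3 - s3.length) (PySem.List.pyGetD s3 (-1) 'a'))

-- ===== PRECONDITION & SPEC =====
def Spec_solution (new_id : String) (out : String) : Prop := out = solution_alt new_id
instance (new_id : String) (out : String) : Decidable (Spec_solution new_id out) := by
  unfold Spec_solution; infer_instance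

-- ===== CLAIM (what is proved, stated in full; the proofs are below) =====
def Claim_equal_solution : Prop := ∀ (new_id : String), Dom_solution new_id → Spec_solution new_id (solution new_id)

-- ===== LEMMAS AND PROOFS =====

-- proof-only intermediate: B's loop on an already lowered-and-filtered list
def pvPass : Option Char → List Char → List Char
  | _, [] => []
  | prev, c :: rest =>
    if c ≠ '.' then c :: pvPass (some c) rest
    else if prev ≠ none ∧ prev ≠ some '.' then c :: pvPass (some c) rest
    else pvPass prev rest

theorem pvLow_eq (c : Char) : pvLow c = PySem.Chars.lowerChar c := by
  simp [pvLow, PySem.Chars.lowerChar, PySem.Chars.isupper]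

theorem pvFilterP_eq (c : Char) : pvFilterP c = (pvKeep c || c == '.') := by
  simp only [pvFilterP, pvKeep, PySem.Chars.islower, PySem.Chars.isdigit]
  rw [Bool.eq_iff_iff]
  simp
  tauto

theorem pvPass_some (l : List Char) : ∀ p, pvPass (some p) l = pvCollapse p l := by
  induction l with
  | nil => intro p; rfl
  | cons c rest ih =>
    intro p
    by_cases hc : c = '.'
    · by_cases hp : p = '.'
      · simp [pvPass, pvCollapse, hc, hp, ih]
      · simp [pvPass, pvCollapse, hc, hp, ih]
    · simp [pvPass, pvCollapse, hc, ih]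

theorem pvStripLead_collapse_dot (l : List Char) :
    pvStripLead (pvCollapse '.' l) = pvStripLead (pvCA l) := by
  cases l with
  | nil => rfl
  | cons c t =>
    by_cases hc : c = '.'
    · subst hc; simp [pvCollapse, pvCA, pvStripLead]
    · simp [pvCollapse, pvCA, hc]

theorem pvPass_none (l : List Char) : pvPass none l = pvStripLead (pvCA l) := by
  induction l with
  | nil => rfl
  | cons c t ih =>
    by_cases hc : c = '.'
    · subst hc
      simp [pvPass, pvCA, pvStripLead, ih, pvStripLead_collapse_dot]
    · simp [pvPass, pvCA, pvStripLead, hc, pvPass_some]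

theorem pvGo_eq_pass (l : List Char) : ∀ prev,
    pvGo prev l = pvPass prev ((PySem.Chars.lower l).filter pvFilterP) := by
  induction l with
  | nil => intro prev; rfl
  | cons c t ih =>
    intro prev
    have hl : pvLow c = PySem.Chars.lowerChar c := pvLow_eq c
    by_cases hk : pvKeep (PySem.Chars.lowerChar c) = true
    · have hf : pvFilterP (PySem.Chars.lowerChar c) = true := by
        rw [pvFilterP_eq]; simp [hk]
      have hnd : ¬ (PySem.Chars.lowerChar c = '.') := by
        intro h; rw [h] at hk; simp [pvKeep] at hk
      simp [pvGo, hl, PySem.Chars.lower, hk, hf, pvPass, hnd, ih]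
    · by_cases hd : PySem.Chars.lowerChar c = '.'
      · have hkf : pvKeep (PySem.Chars.lowerChar c) = false := by simp at hk; exact hk
        simp only [pvGo, hl, hkf, Bool.false_eq_true, if_false, hd,
          PySem.Chars.lower, List.map_cons, List.filter_cons,
          show pvFilterP '.' = true from by decide, if_true]
        by_cases hprev : prev ≠ none ∧ prev ≠ some '.'
        · simp [hprev, pvPass, ih, PySem.Chars.lower]
        · simp [pvPass, hprev, ih, PySem.Chars.lower,
            show pvKeep '.' = false from by decide]
      · have hf : pvFilterP (PySem.Chars.lowerChar c) = false := by
          rw [pvFilterP_eq]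
          simp [hk, hd]
        simp [pvGo, hl, hk, hd, PySem.Chars.lower, List.filter_cons, hf, ih]

theorem pvGo_none (l : List Char) :
    pvGo none l = pvStripLead (pvCA ((PySem.Chars.lower l).filter pvFilterP)) := by
  rw [pvGo_eq_pass, pvPass_none]

def pvDot : Char → Bool := fun c => decide (c = '.')

theorem pvStripTrail_eq (l : List Char) :
    pvStripTrail l = (List.dropWhile pvDot l.reverse).reverse := by
  induction l using List.reverseRecOn with
  | nil => rw [pvStripTrail]; simp
  | append_singleton t a ih =>
    by_cases ha : a = '.'
    · subst ha
      rw [pvStripTrail]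
      simp [pvDot, ih]
    · rw [pvStripTrail]
      simp [pvDot, ha]

theorem pvStripLead_eq (l : List Char) : pvStripLead l = List.dropWhile pvDot l := by
  induction l with
  | nil => rfl
  | cons c t ih =>
    by_cases hc : c = '.'
    · simp [pvStripLead, hc, pvDot, ih]
    · simp [pvStripLead, hc, pvDot]

theorem pvStripLead_head (l : List Char) : (pvStripLead l).head? ≠ some '.' := by
  rw [pvStripLead_eq]
  intro h
  have hne : List.dropWhile pvDot l ≠ [] := by intro hn; rw [hn] at h; simp at h
  have := List.head_dropWhile_not pvDot hne
  rw [List.head?_eq_head hne] at h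
  simp [pvDot] at this
  exact this (by injection h)

theorem pvStripTrail_prefix (l : List Char) : pvStripTrail l <+: l := by
  rw [pvStripTrail_eq]
  have h := List.dropWhile_suffix (l := l.reverse) pvDot
  rw [← List.reverse_reverse (List.dropWhile pvDot l.reverse)] at h
  exact List.reverse_suffix.mp h

theorem pvStripTrail_head (l : List Char) (h : pvStripTrail l ≠ []) :
    (pvStripTrail l).head? = l.head? := by
  obtain ⟨t, ht⟩ := pvStripTrail_prefix l
  cases hs : pvStripTrail l with
  | nil => exact absurd hs h
  | cons c s => rw [← ht, hs]; simp

theorem pvStripTrail_ne_nil (l : List Char) (hl : l ≠ []) (hh : l.head? ≠ some '.') :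
    pvStripTrail l ≠ [] := by
  rw [pvStripTrail_eq]
  intro h
  have hall : ∀ x ∈ l.reverse, pvDot x = true := by
    rw [← List.dropWhile_eq_nil_iff]
    simpa using h
  have hm : l.head hl ∈ l.reverse := by simp [List.head_mem]
  have := hall _ hm
  simp [pvDot] at this
  rw [List.head?_eq_head hl, this] at hh
  exact hh rfl

theorem pvStripTrail_last (l : List Char) : (pvStripTrail l).getLast? ≠ some '.' := by
  rw [pvStripTrail_eq]
  intro h
  rw [List.getLast?_reverse] at h
  have hne : List.dropWhile pvDot l.reverse ≠ [] := by
    intro hn; rw [hn] at h; simp at h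
  have := List.head_dropWhile_not pvDot hne
  rw [List.head?_eq_head hne] at h
  simp [pvDot] at this
  exact this (by injection h)

theorem pvStripChars_dot (l : List Char) :
    PySem.Chars.stripChars l ['.'] = (List.dropWhile pvDot (List.dropWhile pvDot l).reverse).reverse := by
  unfold pvDot
  simp [PySem.Chars.stripChars]

theorem pvStrip_eq_trail (l : List Char) (hh : l.head? ≠ some '.') :
    PySem.Chars.stripChars l ['.'] = pvStripTrail l := by
  rw [pvStripChars_dot, pvStripTrail_eq]
  congr 2
  cases l with
  | nil => rfl
  | cons c t =>
    have : pvDot c = false := by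
      simp [pvDot]; intro hc; rw [hc] at hh; exact hh rfl
    simp [List.dropWhile_cons, this]

theorem pvStrip_noop (l : List Char) (hh : l.head? ≠ some '.') (hl : l.getLast? ≠ some '.') :
    PySem.Chars.stripChars l ['.'] = l := by
  rw [pvStrip_eq_trail l hh, pvStripTrail_eq]
  cases hr : l.reverse with
  | nil => simp_all
  | cons c t =>
    have hc : pvDot c = false := by
      have : l.getLast? = some c := by
        rw [← List.head?_reverse, hr]
        simp
      simp [pvDot]; intro he; rw [he] at this; exact hl this
    rw [List.dropWhile_cons, hc]
    simp [← hr]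

theorem pvPad_eq (l : List Char) (h : l ≠ []) :
    pvPad l = l ++ List.replicate (3 - l.length) (l.getLast h) := by
  match l with
  | [a] =>
    rw [pvPad]; simp
    rw [pvPad]; simp
    rw [pvPad]; simp
  | [a, b] =>
    rw [pvPad]; simp
    rw [pvPad]; simp
  | a :: b :: c :: t =>
    rw [pvPad]
    have : ¬ ((a :: b :: c :: t).length < 3 ∧ (a :: b :: c :: t) ≠ []) := by simp
    rw [dif_neg this]
    have h3 : 3 - (a :: b :: c :: t).length = 0 := by simp
    rw [h3]
    simp

-- pvStripLead does nothing when the head is not a dot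
theorem pvStripLead_noop (l : List Char) (h : l.head? ≠ some '.') : pvStripLead l = l := by
  cases l with
  | nil => rfl
  | cons c t =>
    have hc : ¬ c = '.' := by intro hc; rw [hc] at h; exact h rfl
    simp [pvStripLead, hc]

-- B's tail pipeline equals A's steps 4–7 applied to a lead-stripped list r
theorem pvTail_eq (r : List Char) (hr : r.head? ≠ some '.') :
    (let s2 := PySem.Chars.stripChars
        (PySem.List.slice (PySem.Chars.stripChars r ['.']) none (some 15)) ['.']
     let s3 := if s2 = [] then ['a'] else s2
     s3 ++ List.replicate (3 - s3.length) (PySem.List.pyGetD s3 (-1) 'a'))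
    = pvPad (let s := pvStripTrail r
             if s.length = 0 then ['a']
             else if 16 ≤ s.length then
               pvStripTrail (pvStripLead (PySem.List.slice s none (some 15)))
             else s) := by
  dsimp only
  rw [pvStrip_eq_trail r hr]
  rw [PySem.List.slice_to _ (by norm_num)]
  simp only [show Int.toNat 15 = 15 from rfl]
  have hhead : (pvStripTrail r).head? ≠ some '.' := by
    intro h
    have hne : pvStripTrail r ≠ [] := by intro hn; rw [hn] at h; simp at h
    rw [pvStripTrail_head r hne] at h; exact hr h
  have hlast : (pvStripTrail r).getLast? ≠ some '.' := pvStripTrail_last r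
  by_cases hnil : pvStripTrail r = []
  · rw [hnil]
    simp only [List.take_nil, pvStrip_noop [] (by simp) (by simp)]
    norm_num
    rw [pvPad_eq ['a'] (by simp)]
    simp [PySem.List.pyGetD_neg_one ['a'] 'a' (by simp)]
  · by_cases h16 : 16 ≤ (pvStripTrail r).length
    · have hth : ((pvStripTrail r).take 15).head? = (pvStripTrail r).head? := by
        rw [List.head?_take]; simp
      have htne : (pvStripTrail r).take 15 ≠ [] := by
        have hlen : ((pvStripTrail r).take 15).length = 15 := by
          rw [List.length_take]; omega
        intro h
        rw [h] at hlen
        simp at hlen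
      have hu := pvStripTrail_ne_nil ((pvStripTrail r).take 15) htne (by rw [hth]; exact hhead)
      rw [pvStrip_eq_trail _ (by rw [hth]; exact hhead)]
      rw [if_neg hu]
      rw [if_neg (by simpa using hnil), if_pos h16]
      rw [pvStripLead_noop _ (by rw [hth]; exact hhead)]
      rw [pvPad_eq _ hu]
      rw [PySem.List.pyGetD_neg_one _ 'a' hu]
    · have htake : (pvStripTrail r).take 15 = pvStripTrail r :=
        List.take_of_length_le (by omega)
      rw [htake, pvStrip_noop _ hhead hlast]
      rw [if_neg hnil, if_neg (by simpa using hnil), if_neg h16]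
      rw [pvPad_eq _ hnil]
      rw [PySem.List.pyGetD_neg_one _ 'a' hnil]

theorem solution_eq (new_id : String) : solution new_id = solution_alt new_id := by
  have h := pvTail_eq
    (pvStripLead (pvCA ((PySem.Chars.lower new_id.toList).filter pvFilterP)))
    (pvStripLead_head _)
  dsimp only at h
  unfold solution solution_alt
  rw [PySem.Str.toList_lower, pvGo_none]
  dsimp only
  exact (congrArg String.mk h).symm

-- ===== VERDICT (by name: the statement is the Claim_ definition above) =====
theorem solution_spec : Claim_equal_solution := by
  intro new_id _
  exact solution_eq new_id
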